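-- pv_equiv track=rewrite | github.com/mattdinhnguyen/algos | contiguousSubArrays.py | count_subarrays2
-- ===== SOURCE A (Python) =====
-- def count_subarrays2(arr): #O(N)
--     # this solution uses Stacks. Every index starts with n possibilities.
--     # Using stack, going from left to right, we remove the subarrays that
--     # doesn't satisify the problem condition at this line:
--     # 'result[st.pop()] -= n-i'
--     # Then we do it again from right to left.
--     n = len(arr)
--     result = [n] * n
--     st = []
--     for i, x in enumerate(arr):
--         while st and x >= arr[st[-1]]:
--             result[st.pop()] -= n-i
--         st.append(i)
--     st.clear()
--     for i, x in reversed(list(enumerate(arr))):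
--         while st and x >= arr[st[-1]]:
--             result[st.pop()] -= i+1
--         st.append(i)
--     return result
-- ===== SOURCE B (Python) =====
-- def count_subarrays2(arr):
--     # Simpler O(n^2) re-implementation: for each index j scan outward to the
--     # nearest element >= arr[j] on each side; the span between them is the count.
--     n = len(arr)
--     res = []
--     for j in range(n):
--         l = j - 1
--         while l >= 0 and arr[l] < arr[j]:
--             l -= 1
--         r = j + 1
--         while r < n and arr[r] < arr[j]:
--             r += 1
--         res.append(r - l - 1)
--     return res
-- ===== Notes on version B (the rewrite author's own statement) =====
-- stated objective: simpler
-- what changed: Replaced the two monotonic-stack passes over a mutable result array by a direct per-index bidirectional scan to the nearest weakly-greater element on each side, returning the span r-l-1.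
import Mathlib
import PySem

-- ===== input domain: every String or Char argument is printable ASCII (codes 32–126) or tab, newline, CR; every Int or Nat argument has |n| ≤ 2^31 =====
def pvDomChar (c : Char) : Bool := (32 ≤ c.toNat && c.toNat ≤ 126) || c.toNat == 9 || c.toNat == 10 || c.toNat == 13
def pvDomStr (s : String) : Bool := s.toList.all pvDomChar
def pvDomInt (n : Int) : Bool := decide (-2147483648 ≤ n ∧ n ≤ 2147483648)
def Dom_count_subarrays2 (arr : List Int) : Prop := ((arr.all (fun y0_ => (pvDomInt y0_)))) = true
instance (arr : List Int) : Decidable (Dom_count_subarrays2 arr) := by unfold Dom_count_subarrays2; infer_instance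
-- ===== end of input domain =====

-- B replaces A's two monotonic-stack passes by per-index outward scans (simpler; not faster); return values proved identical on all inputs.

-- ===== PORT A =====
-- the inner 'while st and x >= arr[st[-1]]: result[st.pop()] -= d' loop (d = n-i resp. i+1);
-- stack top = list head
def popLoop (arr : List Int) (x d : Int) : List Nat → List Int → List Int × List Nat
  | [], res => (res, [])
  | j :: st, res =>
    if arr.getD j 0 ≤ x then popLoop arr x d st (res.set j (res.getD j 0 - d))
    else (res, j :: st)

-- one iteration of either 'for' loop body: pop, then push i
def passStep (arr : List Int) (d : Nat → Int) (s : List Int × List Nat) (i : Nat) : List Int × List Nat :=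
  let r := popLoop arr (arr.getD i 0) (d i) s.2 s.1
  (r.1, i :: r.2)

def count_subarrays2 (arr : List Int) : List Int :=
  (((List.range arr.length).reverse).foldl
     (passStep arr (fun i => (i : Int) + 1))
     (((List.range arr.length).foldl
        (passStep arr (fun i => (arr.length : Int) - (i : Int)))
        (List.replicate arr.length (arr.length : Int), ([] : List Nat))).1,
      ([] : List Nat))).1

-- ===== PORT B =====
-- 'l = j-1; while l >= 0 and arr[l] < arr[j]: l -= 1'
def altLgo (arr : List Int) (x : Int) (l : Int) : Int :=
  if h : 0 ≤ l ∧ arr.getD l.toNat 0 < x then altLgo arr x (l - 1) else l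
termination_by (l + 1).toNat
decreasing_by omega

-- 'r = j+1; while r < n and arr[r] < arr[j]: r += 1'
def altRgo (arr : List Int) (x : Int) (r : Nat) : Nat :=
  if h : r < arr.length ∧ arr.getD r 0 < x then altRgo arr x (r + 1) else r
termination_by arr.length - r
decreasing_by omega

def count_subarrays2_alt (arr : List Int) : List Int :=
  (List.range arr.length).map (fun j =>
    (altRgo arr (arr.getD j 0) (j + 1) : Int) - altLgo arr (arr.getD j 0) ((j : Int) - 1) - 1)

-- ===== PRECONDITION & SPEC =====
def Spec_count_subarrays2 (arr : List Int) (out : List Int) : Prop := out = count_subarrays2_alt arr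
instance (arr : List Int) (out : List Int) : Decidable (Spec_count_subarrays2 arr out) := by unfold Spec_count_subarrays2; infer_instance

-- ===== CLAIM (what is proved, stated in full; the proofs are below) =====
def Claim_equal_count_subarrays2 : Prop := ∀ (arr : List Int), Dom_count_subarrays2 arr → Spec_count_subarrays2 arr (count_subarrays2 arr)

-- ===== LEMMAS AND PROOFS =====

-- first k with t < k < m and x ≤ b k (searching the upper end last)
def fh (b : Nat → Int) (x : Int) (t : Nat) : Nat → Option Nat
  | 0 => none
  | m+1 =>
    match fh b x t m with
    | some k => some k
    | none => if t < m ∧ x ≤ b m then some m else none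

-- the surviving stack after processing times 0..m-1, most recent first
def surv (b : Nat → Int) (m : Nat) : List Nat :=
  ((List.range m).filter (fun t => fh b (b t) t m == none)).reverse

lemma fh_some_weak (b : Nat → Int) (x : Int) (t : Nat) :
    ∀ m k, fh b x t m = some k → t < k ∧ k < m ∧ x ≤ b k := by
  intro m
  induction m with
  | zero => intro k h; simp [fh] at h
  | succ m ih =>
    intro k h
    rw [fh] at h
    cases hm : fh b x t m with
    | some k' =>
      rw [hm] at h
      simp at h
      subst h
      obtain ⟨h1, h2, h3⟩ := ih k' hm
      exact ⟨h1, by omega, h3⟩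
    | none =>
      rw [hm] at h
      by_cases hc : t < m ∧ x ≤ b m
      · simp [hc] at h
        subst h
        exact ⟨hc.1, by omega, hc.2⟩
      · simp [hc] at h

lemma fh_eq_none_iff (b : Nat → Int) (x : Int) (t : Nat) :
    ∀ m, fh b x t m = none ↔ ∀ k, t < k → k < m → b k < x := by
  intro m
  induction m with
  | zero => simp [fh]
  | succ m ih =>
    rw [fh]
    cases hm : fh b x t m with
    | some k =>
      obtain ⟨h1, h2, h3⟩ := fh_some_weak b x t m k hm
      simp only []
      constructor
      · intro h; simp at h
      · intro h
        exact absurd (h k h1 (by omega)) (by omega)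
    | none =>
      rw [hm] at ih
      simp only [true_iff] at ih
      constructor
      · intro h k hk1 hk2
        by_cases hkm : k < m
        · exact ih k hk1 hkm
        · have hkeq : k = m := by omega
          subst hkeq
          by_cases hc : t < k ∧ x ≤ b k
          · simp [hc] at h
          · rcases not_and_or.mp hc with h' | h'
            · omega
            · omega
      · intro h
        have hc : ¬ (t < m ∧ x ≤ b m) := by
          intro ⟨h1, h2⟩
          exact absurd (h m h1 (by omega)) (by omega)
        simp [hc]

lemma fh_eq_some (b : Nat → Int) (x : Int) (t : Nat) (m k : Nat) (h : fh b x t m = some k) :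
    t < k ∧ k < m ∧ x ≤ b k ∧ ∀ j, t < j → j < k → b j < x := by
  obtain ⟨h1, h2, h3⟩ := fh_some_weak b x t m k h
  refine ⟨h1, h2, h3, ?_⟩
  -- minimality: by induction on m
  induction m with
  | zero => simp [fh] at h
  | succ m ih =>
    rw [fh] at h
    cases hm : fh b x t m with
    | some k' =>
      rw [hm] at h; simp at h; subst h
      obtain ⟨g1, g2, g3⟩ := fh_some_weak b x t m k' hm
      exact ih hm g2
    | none =>
      rw [hm] at h
      by_cases hc : t < m ∧ x ≤ b m
      · simp [hc] at h; subst h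
        intro j hj1 hj2
        exact (fh_eq_none_iff b x t m).mp hm j hj1 hj2
      · simp [hc] at h

lemma fh_self_none (b : Nat → Int) (x : Int) (t m : Nat) (h : m ≤ t + 1) :
    fh b x t m = none := by
  rw [fh_eq_none_iff]
  intro k h1 h2; omega

lemma fh_succ_none_iff (b : Nat → Int) (x : Int) (t m : Nat) (ht : t < m) :
    (fh b x t (m+1) = none) ↔ (fh b x t m = none ∧ ¬ x ≤ b m) := by
  rw [fh]
  cases hm : fh b x t m with
  | some k => simp
  | none =>
    simp only [true_and]
    by_cases hc : t < m ∧ x ≤ b m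
    · simp [hc]
    · simp [hc]; omega

lemma mem_surv (b : Nat → Int) (m t : Nat) :
    t ∈ surv b m ↔ t < m ∧ fh b (b t) t m = none := by
  simp [surv, List.mem_filter, List.mem_range]

lemma surv_pairwise_gt (b : Nat → Int) (m : Nat) :
    (surv b m).Pairwise (fun u v => v < u) := by
  unfold surv
  rw [List.pairwise_reverse]
  exact List.Pairwise.filter _ (List.pairwise_lt_range)

lemma surv_succ (b : Nat → Int) (m : Nat) :
    surv b (m+1) = m :: (surv b m).filter (fun t => !decide (b t ≤ b m)) := by
  unfold surv
  have hm : (fh b (b m) m (m+1)) = none := by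
    rw [fh, fh_self_none b (b m) m m (by omega)]
    simp
  rw [List.range_succ, List.filter_append, List.reverse_append]
  have h1 : List.filter (fun t => fh b (b t) t (m+1) == none) [m] = [m] := by
    simp [hm]
  rw [h1, List.filter_reverse]
  have h2 : List.filter (fun t => fh b (b t) t (m+1) == none) (List.range m)
      = List.filter (fun t => !decide (b t ≤ b m))
          (List.filter (fun t => fh b (b t) t m == none) (List.range m)) := by
    rw [List.filter_filter]
    apply List.filter_congr
    intro t htm
    rw [List.mem_range] at htm
    have := fh_succ_none_iff b (b t) t m htm
    by_cases hn : fh b (b t) t (m+1) = none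
    · have := this.mp hn
      simp [hn, this.1, this.2]
    · cases hk : fh b (b t) t (m+1) with
      | none => exact absurd hk hn
      | some k' =>
        cases hfm : fh b (b t) t m with
        | some k => simp [hfm]
        | none =>
          have h3 : ¬ (fh b (b t) t m = none ∧ ¬ b t ≤ b m) := fun h => hn (this.mpr h)
          simp only [hfm, true_and, not_not] at h3
          simp [hfm, h3]
  rw [h2]
  simp

lemma popLoop_eq (arr : List Int) (x d : Int) :
    ∀ (st : List Nat) (res : List Int),
      popLoop arr x d st res =
        ((st.takeWhile (fun j => decide (arr.getD j 0 ≤ x))).foldl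
            (fun r j => r.set j (r.getD j 0 - d)) res,
         st.dropWhile (fun j => decide (arr.getD j 0 ≤ x))) := by
  intro st
  induction st with
  | nil => intro res; rfl
  | cons j st ih =>
    intro res
    rw [popLoop]
    by_cases h : arr.getD j 0 ≤ x
    · rw [if_pos h, ih]
      rw [List.takeWhile_cons, List.dropWhile_cons, if_pos (by simpa using h), if_pos (by simpa using h), List.foldl_cons]
    · rw [if_neg h]
      rw [List.takeWhile_cons, List.dropWhile_cons, if_neg (by simpa using h), if_neg (by simpa using h), List.foldl_nil]

lemma takeWhile_eq_filter_of_pairwise {α : Type} (q : α → Bool) :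
    ∀ l : List α, l.Pairwise (fun u v => q v = true → q u = true) →
      l.takeWhile q = l.filter q ∧ l.dropWhile q = l.filter (fun t => !q t) := by
  intro l
  induction l with
  | nil => intro _; exact ⟨rfl, rfl⟩
  | cons a l ih =>
    intro hp
    rw [List.pairwise_cons] at hp
    obtain ⟨ha, hp⟩ := hp
    obtain ⟨ih1, ih2⟩ := ih hp
    by_cases hq : q a = true
    · simp [List.takeWhile_cons, List.dropWhile_cons, List.filter_cons, hq, ih1, ih2]
    · have hall : ∀ v ∈ l, q v = false := by
        intro v hv
        cases hqv : q v
        · rfl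
        · exact absurd (ha v hv hqv) hq
      have e1 : List.filter q l = [] := List.filter_eq_nil_iff.mpr (by intro v hv; simp [hall v hv])
      have e2 : List.filter (fun t => !q t) l = l := List.filter_eq_self.mpr (by intro v hv; simp [hall v hv])
      constructor
      · simp [List.takeWhile_cons, List.filter_cons, hq, e1]
      · simp [List.dropWhile_cons, List.filter_cons, hq, e2]

lemma foldl_set_getD (d : Int) :
    ∀ (js : List Nat) (res : List Int) (p : Nat), js.Nodup →
      (js.foldl (fun r j => r.set j (r.getD j 0 - d)) res).getD p 0 =
        if p ∈ js ∧ p < res.length then res.getD p 0 - d else res.getD p 0 := by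
  intro js
  induction js with
  | nil => intro res p _; simp
  | cons j js ih =>
    intro res p hnd
    rw [List.nodup_cons] at hnd
    obtain ⟨hj, hnd⟩ := hnd
    rw [List.foldl_cons, ih _ p hnd]
    by_cases hpj : p = j
    · subst hpj
      have hpm : p ∉ js := hj
      simp only [List.length_set, List.mem_cons, hpm, or_false]
      by_cases hpl : p < res.length
      · simp [hpm, hpl, List.getD_eq_getElem?_getD, List.getElem?_set_self]
      · simp [hpm, hpl, List.getD_eq_getElem?_getD, List.getElem?_set]
    · have : (res.set j (res.getD j 0 - d)).getD p 0 = res.getD p 0 := by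
        simp [List.getD_eq_getElem?_getD, List.getElem?_set_ne (by omega : j ≠ p)]
      rw [List.length_set, this]
      simp [List.mem_cons, hpj]

lemma fh_succ_of_some (b : Nat → Int) (x : Int) (t m k : Nat) (h : fh b x t m = some k) :
    fh b x t (m+1) = some k := by
  simp [fh, h]

lemma foldl_set_length (d : Int) :
    ∀ (js : List Nat) (res : List Int),
      (js.foldl (fun r j => r.set j (r.getD j 0 - d)) res).length = res.length := by
  intro js
  induction js with
  | nil => intro res; rfl
  | cons j js ih => intro res; rw [List.foldl_cons, ih, List.length_set]

lemma pass_spec (arr : List Int) (pos : Nat → Nat) (d : Nat → Int) (n : Nat) (res0 : List Int)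
    (hinj : ∀ t1 t2, t1 < n → t2 < n → pos t1 = pos t2 → t1 = t2)
    (hlt : ∀ t, t < n → pos t < res0.length) :
    ∀ m, m ≤ n →
      (((List.range m).map pos).foldl (passStep arr d) (res0, ([] : List Nat))).2
        = (surv (fun t => arr.getD (pos t) 0) m).map pos ∧
      (((List.range m).map pos).foldl (passStep arr d) (res0, ([] : List Nat))).1.length
        = res0.length ∧
      ∀ t, t < n →
        (((List.range m).map pos).foldl (passStep arr d) (res0, ([] : List Nat))).1.getD (pos t) 0
          = res0.getD (pos t) 0 -
            (match fh (fun t => arr.getD (pos t) 0) (arr.getD (pos t) 0) t m with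
             | some k => d (pos k)
             | none => 0) := by
  intro m
  induction m with
  | zero =>
    intro _
    refine ⟨by simp [surv], by simp, ?_⟩
    intro t ht
    simp [fh]
  | succ m ih =>
    intro hmn
    obtain ⟨hst, hlen, hres⟩ := ih (by omega)
    have hsplit : ((List.range (m+1)).map pos).foldl (passStep arr d) (res0, ([] : List Nat))
        = passStep arr d (((List.range m).map pos).foldl (passStep arr d) (res0, ([] : List Nat))) (pos m) := by
      rw [List.range_succ, List.map_append, List.foldl_append]
      rfl
    set S := ((List.range m).map pos).foldl (passStep arr d) (res0, ([] : List Nat)) with hS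
    set b : Nat → Int := fun t => arr.getD (pos t) 0 with hb
    set x : Int := arr.getD (pos m) 0 with hx
    set q : Nat → Bool := fun j => decide (arr.getD j 0 ≤ x) with hq
    have hqpos : ∀ t, q (pos t) = decide (b t ≤ x) := by intro t; rfl
    -- the stack splits at the first element with b > x
    have hpw : ((surv b m)).Pairwise (fun u v => (q ∘ pos) v = true → (q ∘ pos) u = true) := by
      apply List.Pairwise.imp_of_mem ?_ (surv_pairwise_gt b m)
      intro u v hu hv huv hqv
      rw [mem_surv] at hu hv
      have hbu : arr.getD (pos u) 0 < arr.getD (pos v) 0 :=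
        (fh_eq_none_iff b (b v) v m).mp hv.2 u huv hu.1
      simp only [Function.comp, hq, decide_eq_true_eq] at hqv ⊢
      omega
    obtain ⟨htake, hdrop⟩ := takeWhile_eq_filter_of_pairwise (q ∘ pos) (surv b m) hpw
    have hpop : popLoop arr x (d (pos m)) S.2 S.1
        = (((((surv b m).filter (q ∘ pos)).map pos)).foldl
            (fun r j => r.set j (r.getD j 0 - d (pos m))) S.1,
           (((surv b m).filter (fun t => !(q ∘ pos) t)).map pos)) := by
      rw [popLoop_eq, hst]
      rw [List.takeWhile_map, List.dropWhile_map, htake, hdrop]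
    have hsub : ∀ u ∈ surv b m, u < m := by
      intro u hu; exact ((mem_surv b m u).mp hu).1
    have hnd : (((surv b m).filter (q ∘ pos)).map pos).Nodup := by
      apply List.Nodup.map_on
      · intro t1 h1 t2 h2 he
        exact hinj t1 t2 (by have := hsub t1 (List.mem_of_mem_filter h1); omega)
          (by have := hsub t2 (List.mem_of_mem_filter h2); omega) he
      · exact List.Nodup.filter _ (by
          unfold surv
          exact List.nodup_reverse.mpr (List.Nodup.filter _ (List.nodup_range)))
    have hmemmap : ∀ t, t < n → ((pos t ∈ ((surv b m).filter (q ∘ pos)).map pos)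
        ↔ t ∈ (surv b m).filter (q ∘ pos)) := by
      intro t ht
      constructor
      · intro h
        obtain ⟨t', ht', he⟩ := List.mem_map.mp h
        have : t' = t := hinj t' t (by have := hsub t' (List.mem_of_mem_filter ht'); omega) ht he
        rwa [this] at ht'
      · intro h; exact List.mem_map.mpr ⟨t, h, rfl⟩
    rw [hsplit]
    unfold passStep
    simp only [← hx, hpop]
    refine ⟨?_, ?_, ?_⟩
    · -- stack
      rw [surv_succ]
      simp only [List.map_cons]
      rfl
    · rw [foldl_set_length, hlen]
    · intro t ht
      have hplen : pos t < S.1.length := by rw [hlen]; exact hlt t ht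
      rw [foldl_set_getD _ _ _ _ hnd]
      by_cases htm : t < m
      · cases hfh : fh b (b t) t m with
        | some k =>
          have hns : t ∉ surv b m := by
            rw [mem_surv]; intro h; rw [hfh] at h; cases h.2
          have hnp : pos t ∉ ((surv b m).filter (q ∘ pos)).map pos := by
            rw [hmemmap t ht]
            intro h; exact hns (List.mem_of_mem_filter h)
          rw [if_neg (by intro h; exact hnp h.1)]
          rw [fh_succ_of_some b (b t) t m k hfh]
          have := hres t ht
          rw [hfh] at this
          exact this
        | none =>
          have hsv : t ∈ surv b m := (mem_surv b m t).mpr ⟨htm, hfh⟩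
          by_cases hbt : b t ≤ b m
          · have hmem : t ∈ (surv b m).filter (q ∘ pos) := by
              apply List.mem_filter.mpr
              exact ⟨hsv, by simp [hq, hx, hb]; exact hbt⟩
            rw [if_pos ⟨(hmemmap t ht).mpr hmem, hplen⟩]
            have hnew : fh b (b t) t (m+1) = some m := by
              rw [fh, hfh]
              simp only []
              rw [if_pos ⟨htm, hbt⟩]
            rw [hnew]
            have := hres t ht
            rw [hfh] at this
            rw [this]
            ring
          · have hnp : pos t ∉ ((surv b m).filter (q ∘ pos)).map pos := by
              rw [hmemmap t ht]
              intro h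
              have := (List.mem_filter.mp h).2
              simp [hq, hx, hb] at this
              exact hbt this
            rw [if_neg (by intro h; exact hnp h.1)]
            have hnew : fh b (b t) t (m+1) = none := by
              rw [fh, hfh]
              simp only []
              rw [if_neg (by intro h; exact hbt h.2)]
            rw [hnew]
            have := hres t ht
            rw [hfh] at this
            exact this
      · have hfo : fh b (b t) t m = none := fh_self_none b (b t) t m (by omega)
        have hfn : fh b (b t) t (m+1) = none := fh_self_none b (b t) t (m+1) (by omega)
        have hnp : pos t ∉ ((surv b m).filter (q ∘ pos)).map pos := by
          rw [hmemmap t ht]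
          intro h
          exact htm (hsub t (List.mem_of_mem_filter h))
        rw [if_neg (by intro h; exact hnp h.1)]
        rw [hfn]
        have := hres t ht
        rw [hfo] at this
        exact this

lemma altRgo_spec (arr : List Int) (x : Int) :
    ∀ r, r ≤ arr.length →
      r ≤ altRgo arr x r ∧ altRgo arr x r ≤ arr.length ∧
      (∀ k, r ≤ k → k < altRgo arr x r → arr.getD k 0 < x) ∧
      (altRgo arr x r < arr.length → x ≤ arr.getD (altRgo arr x r) 0) := by
  have aux : ∀ fuel r, arr.length ≤ r + fuel → r ≤ arr.length →
      r ≤ altRgo arr x r ∧ altRgo arr x r ≤ arr.length ∧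
      (∀ k, r ≤ k → k < altRgo arr x r → arr.getD k 0 < x) ∧
      (altRgo arr x r < arr.length → x ≤ arr.getD (altRgo arr x r) 0) := by
    intro fuel
    induction fuel with
    | zero =>
      intro r hf hr
      have hre : ¬ (r < arr.length ∧ arr.getD r 0 < x) := by omega
      rw [altRgo, dif_neg hre]
      exact ⟨le_refl r, hr, fun k h1 h2 => absurd h1 (by omega), fun h => by omega⟩
    | succ fuel ih =>
      intro r hf hr
      by_cases hc : r < arr.length ∧ arr.getD r 0 < x
      · rw [altRgo, dif_pos hc]
        obtain ⟨i1, i2, i3, i4⟩ := ih (r+1) (by omega) (by omega)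
        refine ⟨by omega, i2, ?_, i4⟩
        intro k h1 h2
        by_cases hk : k = r
        · rw [hk]; exact hc.2
        · exact i3 k (by omega) h2
      · rw [altRgo, dif_neg hc]
        refine ⟨le_refl r, hr, fun k h1 h2 => absurd h1 (by omega), fun h => ?_⟩
        rcases not_and_or.mp hc with h' | h'
        · omega
        · omega
  intro r hr
  exact aux (arr.length - r) r (by omega) hr

lemma altLgo_spec (arr : List Int) (x : Int) :
    ∀ l : Int, -1 ≤ l →
      altLgo arr x l ≤ l ∧ -1 ≤ altLgo arr x l ∧
      (∀ k : Int, altLgo arr x l < k → k ≤ l → 0 ≤ k → arr.getD k.toNat 0 < x) ∧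
      (0 ≤ altLgo arr x l → x ≤ arr.getD (altLgo arr x l).toNat 0) := by
  have aux : ∀ (fuel : Nat) (l : Int), (l + 1).toNat ≤ fuel → -1 ≤ l →
      altLgo arr x l ≤ l ∧ -1 ≤ altLgo arr x l ∧
      (∀ k : Int, altLgo arr x l < k → k ≤ l → 0 ≤ k → arr.getD k.toNat 0 < x) ∧
      (0 ≤ altLgo arr x l → x ≤ arr.getD (altLgo arr x l).toNat 0) := by
    intro fuel
    induction fuel with
    | zero =>
      intro l hf hl
      have hle : l = -1 := by omega
      have hre : ¬ (0 ≤ l ∧ arr.getD l.toNat 0 < x) := by omega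
      rw [altLgo, dif_neg hre]
      exact ⟨le_refl l, hl, fun k h1 h2 h3 => absurd h2 (by omega), fun h => by omega⟩
    | succ fuel ih =>
      intro l hf hl
      by_cases hc : 0 ≤ l ∧ arr.getD l.toNat 0 < x
      · rw [altLgo, dif_pos hc]
        obtain ⟨i1, i2, i3, i4⟩ := ih (l-1) (by omega) (by omega)
        refine ⟨by omega, i2, ?_, i4⟩
        intro k h1 h2 h3
        by_cases hk : k = l
        · rw [hk]; exact hc.2
        · exact i3 k h1 (by omega) h3
      · rw [altLgo, dif_neg hc]
        refine ⟨le_refl l, hl, fun k h1 h2 h3 => absurd h2 (by omega), fun h => ?_⟩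
        rcases not_and_or.mp hc with h' | h'
        · omega
        · omega
  intro l hl
  exact aux (l + 1).toNat l (by omega) hl

lemma altRgo_eq_fh (arr : List Int) (x : Int) (j : Nat) (hj : j < arr.length) :
    altRgo arr x (j + 1) =
      (match fh (fun k => arr.getD k 0) x j arr.length with
       | some k => k
       | none => arr.length) := by
  obtain ⟨s1, s2, s3, s4⟩ := altRgo_spec arr x (j+1) (by omega)
  cases hf : fh (fun k => arr.getD k 0) x j arr.length with
  | none =>
    show altRgo arr x (j + 1) = arr.length
    have hall := (fh_eq_none_iff (fun k => arr.getD k 0) x j arr.length).mp hf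
    by_contra hne
    have hlt : altRgo arr x (j+1) < arr.length := by omega
    have h1 : x ≤ arr.getD (altRgo arr x (j+1)) 0 := s4 hlt
    have h2 : arr.getD (altRgo arr x (j+1)) 0 < x := hall _ (by omega) hlt
    omega
  | some k =>
    show altRgo arr x (j + 1) = k
    obtain ⟨h1, h2, h3, h4⟩ := fh_eq_some (fun k => arr.getD k 0) x j arr.length k hf
    rcases lt_trichotomy (altRgo arr x (j+1)) k with h | h | h
    · have hx1 : x ≤ arr.getD (altRgo arr x (j+1)) 0 := s4 (by omega)
      have hx2 : arr.getD (altRgo arr x (j+1)) 0 < x := h4 _ (by omega) h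
      omega
    · exact h
    · have := s3 k (by omega) h
      omega

lemma altLgo_eq_fh (arr : List Int) (x : Int) (t : Nat) (ht : t < arr.length) :
    altLgo arr x ((((arr.length - 1 - t : Nat)) : Int) - 1) =
      (match fh (fun k => arr.getD (arr.length - 1 - k) 0) x t arr.length with
       | some k => ((arr.length - 1 - k : Nat) : Int)
       | none => -1) := by
  obtain ⟨s1, s2, s3, s4⟩ := altLgo_spec arr x ((((arr.length - 1 - t : Nat)) : Int) - 1) (by omega)
  set L := altLgo arr x ((((arr.length - 1 - t : Nat)) : Int) - 1) with hL
  cases hf : fh (fun k => arr.getD (arr.length - 1 - k) 0) x t arr.length with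
  | none =>
    show L = -1
    have hall := (fh_eq_none_iff (fun k => arr.getD (arr.length - 1 - k) 0) x t arr.length).mp hf
    by_contra hne
    have h0 : 0 ≤ L := by omega
    have h1 : x ≤ arr.getD L.toNat 0 := s4 h0
    have hk : arr.getD (arr.length - 1 - (arr.length - 1 - L.toNat)) 0 < x :=
      hall (arr.length - 1 - L.toNat) (by omega) (by omega)
    rw [show arr.length - 1 - (arr.length - 1 - L.toNat) = L.toNat by omega] at hk
    omega
  | some k =>
    show L = ((arr.length - 1 - k : Nat) : Int)
    obtain ⟨h1, h2, h3, h4⟩ := fh_eq_some (fun k => arr.getD (arr.length - 1 - k) 0) x t arr.length k hf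
    rcases lt_trichotomy L ((arr.length - 1 - k : Nat) : Int) with h | h | h
    · have hx2 : arr.getD ((arr.length - 1 - k : Nat) : Int).toNat 0 < x :=
        s3 _ h (by omega) (by omega)
      rw [show ((arr.length - 1 - k : Nat) : Int).toNat = arr.length - 1 - k by omega] at hx2
      omega
    · exact h
    · have h0 : 0 ≤ L := by omega
      have hx1 : x ≤ arr.getD L.toNat 0 := s4 h0
      have hx2 : arr.getD (arr.length - 1 - (arr.length - 1 - L.toNat)) 0 < x :=
        h4 (arr.length - 1 - L.toNat) (by omega) (by omega)
      rw [show arr.length - 1 - (arr.length - 1 - L.toNat) = L.toNat by omega] at hx2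
      omega

lemma range_map_rev (n : Nat) :
    (List.range n).map (fun t => n - 1 - t) = (List.range n).reverse := by
  apply List.ext_getElem
  · simp
  · intro i h1 h2
    simp only [List.getElem_map, List.getElem_range, List.getElem_reverse]
    have hi : i < n := by simpa using h2
    simp

-- ===== VERDICT (by name: the statement is the Claim_ definition above) =====
theorem count_subarrays2_spec : Claim_equal_count_subarrays2 := by
  intro arr _
  unfold Spec_count_subarrays2 count_subarrays2 count_subarrays2_alt
  set n := arr.length with hn
  clear_value n
  have hmapid : (List.range n).map (fun t => t) = List.range n := by simp
  obtain ⟨st1, len1, res1⟩ := pass_spec arr (fun t => t) (fun i => (n : Int) - (i : Int)) n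
      (List.replicate n (n : Int)) (fun t1 t2 _ _ h => h)
      (by intro t ht; simpa using ht) n (le_refl n)
  rw [hmapid] at len1 res1
  set P1 := (List.range n).foldl (passStep arr (fun i => (n : Int) - (i : Int)))
      (List.replicate n (n : Int), ([] : List Nat)) with hP1
  obtain ⟨st2, len2, res2⟩ := pass_spec arr (fun t => n - 1 - t) (fun i => (i : Int) + 1) n
      P1.1 (fun t1 t2 h1 h2 h => by simp only [] at h; omega)
      (by intro t ht; rw [len1]; simp [List.length_replicate]; omega) n (le_refl n)
  rw [range_map_rev] at len2 res2
  apply List.ext_getElem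
  · rw [len2, len1]; simp
  · intro j hj1 hj2
    have hjn : j < n := by
      rw [len2, len1] at hj1; simpa using hj1
    have ht : n - 1 - j < n := by omega
    have hres := res2 (n - 1 - j) ht
    rw [show n - 1 - (n - 1 - j) = j by omega] at hres
    have hres1j := res1 j hjn
    simp only [] at hres1j hres
    have hrepl : (List.replicate n ((n : Int))).getD j 0 = (n : Int) := by
      simp [List.getD_eq_getElem?_getD, List.getElem?_replicate, hjn]
    rw [hrepl] at hres1j
    have hgA : (((List.range n).reverse).foldl (passStep arr (fun i => (i : Int) + 1))
        (P1.1, ([] : List Nat))).1[j] =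
        (((List.range n).reverse).foldl (passStep arr (fun i => (i : Int) + 1))
        (P1.1, ([] : List Nat))).1.getD j 0 := by
      rw [List.getD_eq_getElem?_getD, List.getElem?_eq_getElem hj1, Option.getD_some]
    simp only [List.getElem_map, List.getElem_range]
    have hR := altRgo_eq_fh arr (arr.getD j 0) j (by omega)
    have hL := altLgo_eq_fh arr (arr.getD j 0) (n - 1 - j) (by omega)
    rw [show arr.length - 1 - (n - 1 - j) = j by omega] at hL
    rw [← hn] at hR hL
    cases hf1 : fh (fun k => arr.getD k 0) (arr.getD j 0) j n with
    | some k1 =>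
      simp only [hf1] at hR hres1j
      cases hf2 : fh (fun t => arr.getD (n - 1 - t) 0) (arr.getD j 0) (n - 1 - j) n with
      | some k2 =>
        simp only [hf2] at hL hres
        rw [hgA, hres, hres1j, hR, hL]
        ring
      | none =>
        simp only [hf2] at hL hres
        rw [hgA, hres, hres1j, hR, hL]
        ring
    | none =>
      simp only [hf1] at hR hres1j
      cases hf2 : fh (fun t => arr.getD (n - 1 - t) 0) (arr.getD j 0) (n - 1 - j) n with
      | some k2 =>
        simp only [hf2] at hL hres
        rw [hgA, hres, hres1j, hR, hL]
        ring
      | none =>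
        simp only [hf2] at hL hres
        rw [hgA, hres, hres1j, hR, hL]
        ring
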